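-- pv_equiv track=rewrite | github.com/Jiyesss/AlgorithmStudy_summer | 1138.한 줄로 서기.py | arrange_line
-- ===== SOURCE A (Python) =====
-- def arrange_line(heights):
--     n = len(heights)
--     result = [0] * n
--
--     for i in range(n):
--         count = heights[i]
--         for j in range(n):
--             if count == 0 and result[j] == 0:
--                 result[j] = i + 1
--                 break
--             elif result[j] == 0:
--                 count -= 1
--
--     return result
-- ===== SOURCE B (Python) =====
-- def arrange_line(heights):
--     n = len(heights)
--     result = [0] * n
--     empties = list(range(n))
--     for i, c in enumerate(heights):
--         if 0 <= c < len(empties):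
--             pos = empties.pop(c)
--             result[pos] = i + 1
--     return result
-- ===== Notes on version B (the rewrite author's own statement) =====
-- stated objective: faster
-- what changed: A rescans the whole result array per person, decrementing a counter over still-empty cells; B maintains a list of empty slot indices and directly pops the c-th one, eliminating the inner scan.
import Mathlib
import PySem

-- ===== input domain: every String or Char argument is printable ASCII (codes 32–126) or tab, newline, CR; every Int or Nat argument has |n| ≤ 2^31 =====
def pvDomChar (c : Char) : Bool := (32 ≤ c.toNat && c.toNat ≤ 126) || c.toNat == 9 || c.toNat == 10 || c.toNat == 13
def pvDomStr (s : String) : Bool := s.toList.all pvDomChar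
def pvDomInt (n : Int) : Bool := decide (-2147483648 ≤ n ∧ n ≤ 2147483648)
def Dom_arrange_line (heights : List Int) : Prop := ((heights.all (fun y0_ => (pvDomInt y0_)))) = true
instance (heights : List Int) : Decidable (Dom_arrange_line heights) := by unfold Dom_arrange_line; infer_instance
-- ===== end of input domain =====

-- B replaces A's quadratic rescanning (decrementing a counter over still-empty cells) by a
-- maintained list of empty slot indices from which the k-th empty slot is taken directly.

-- ===== PORT A =====
-- A's inner 'for j in range(n)' scans result left to right: structural scan of the result list.
def pvInnerA (count : Int) (v : Int) : List Int → List Int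
  | [] => []
  | r :: rs =>
    if count = 0 ∧ r = 0 then v :: rs
    else if r = 0 then r :: pvInnerA (count - 1) v rs
    else r :: pvInnerA count v rs

def arrange_line (heights : List Int) : List Int :=
  let n := heights.length
  (PySem.List.pyRange 0 n 1).foldl
    (fun result i => pvInnerA (PySem.List.pyGetD heights i 0) (i + 1) result)
    (List.replicate n 0)

-- ===== PORT B =====
-- empties.pop(c): remove and return the element at index c.
def pvPopIdx {α : Type} : List α → Nat → Option (α × List α)
  | [], _ => none
  | x :: xs, 0 => some (x, xs)
  | x :: xs, k + 1 => (pvPopIdx xs k).map (fun p => (p.1, x :: p.2))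

def pvStepB (st : List Int × List Nat) (p : Int × Int) : List Int × List Nat :=
  if 0 ≤ p.2 ∧ p.2 < (st.2.length : Int) then
    match pvPopIdx st.2 p.2.toNat with
    | some (pos, empties') => (st.1.set pos (p.1 + 1), empties')
    | none => st
  else st

def arrange_line_alt (heights : List Int) : List Int :=
  let n := heights.length
  ((PySem.List.enumerate heights 0).foldl pvStepB (List.replicate n 0, List.range n)).1

-- ===== PRECONDITION & SPEC =====
def Spec_arrange_line (heights : List Int) (out : List Int) : Prop := out = arrange_line_alt heights
instance (heights : List Int) (out : List Int) : Decidable (Spec_arrange_line heights out) := by unfold Spec_arrange_line; infer_instance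

-- ===== CLAIM (what is proved, stated in full; the proofs are below) =====
def Claim_equal_arrange_line : Prop := ∀ (heights : List Int), Dom_arrange_line heights → Spec_arrange_line heights (arrange_line heights)

-- ===== LEMMAS AND PROOFS =====

-- positions of the zero (empty) cells of result, in increasing order
def pvZpos : List Int → List Nat
  | [] => []
  | r :: rs => if r = 0 then 0 :: (pvZpos rs).map (· + 1) else (pvZpos rs).map (· + 1)

theorem pvInnerA_neg (r : List Int) : ∀ (c v : Int), c < 0 → pvInnerA c v r = r := by
  induction r with
  | nil => intro c v _; rfl
  | cons x rs ih =>
    intro c v hc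
    by_cases hx : x = 0
    · simp [pvInnerA, hx, ih (c - 1) v (by omega)]; omega
    · simp [pvInnerA, hx, ih c v hc]

theorem pvInnerA_big (r : List Int) : ∀ (c v : Int), 0 ≤ c → ((pvZpos r).length : Int) ≤ c →
    pvInnerA c v r = r := by
  induction r with
  | nil => intro c v _ _; rfl
  | cons x rs ih =>
    intro c v hc hlen
    by_cases hx : x = 0
    · simp [pvZpos, hx] at hlen
      simp [pvInnerA, hx, ih (c - 1) v (by omega) (by omega)]; omega
    · simp [pvZpos, hx] at hlen
      simp [pvInnerA, hx, ih c v hc (by omega)]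

theorem pvPopIdx_map {α β : Type} (f : α → β) (l : List α) : ∀ (k : Nat),
    pvPopIdx (l.map f) k = (pvPopIdx l k).map (fun p => (f p.1, p.2.map f)) := by
  induction l with
  | nil => intro k; cases k <;> rfl
  | cons x xs ih =>
    intro k
    cases k with
    | zero => rfl
    | succ k =>
      simp [pvPopIdx, ih k]
      cases pvPopIdx xs k <;> simp

theorem pvPlace (r : List Int) : ∀ (k : Nat) (v : Int), v ≠ 0 → k < (pvZpos r).length →
    ∃ p e', pvPopIdx (pvZpos r) k = some (p, e') ∧
      pvInnerA (k : Int) v r = r.set p v ∧ pvZpos (r.set p v) = e' := by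
  induction r with
  | nil => intro k v _ h; simp [pvZpos] at h
  | cons x rs ih =>
    intro k v hv hk
    by_cases hx : x = 0
    · subst hx
      cases k with
      | zero =>
        exact ⟨0, (pvZpos rs).map (· + 1), rfl, by simp [pvInnerA], by simp [pvZpos, hv]⟩
      | succ k =>
        simp [pvZpos] at hk
        obtain ⟨p, e', hpop, hinner, hz⟩ := ih k v hv hk
        refine ⟨p + 1, 0 :: e'.map (· + 1), ?_, ?_, ?_⟩
        · simp [pvZpos, pvPopIdx, pvPopIdx_map, hpop]
        · have : ((k : Nat) + 1 : Int) - 1 = (k : Int) := by ring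
          simp [pvInnerA, this, hinner]; omega
        · simp [pvZpos, hz]
    · simp [pvZpos, hx] at hk
      obtain ⟨p, e', hpop, hinner, hz⟩ := ih k v hv hk
      refine ⟨p + 1, e'.map (· + 1), ?_, ?_, ?_⟩
      · simp [pvZpos, hx, pvPopIdx_map, hpop]
      · simp [pvInnerA, hx, hinner]
      · simp [pvZpos, hx, hz]

theorem pvStep_eq (result : List Int) (i c : Int) (hi : 0 ≤ i) :
    pvStepB (result, pvZpos result) (i, c)
      = (pvInnerA c (i + 1) result, pvZpos (pvInnerA c (i + 1) result)) := by
  by_cases hc : 0 ≤ c ∧ c < ((pvZpos result).length : Int)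
  · have hk : c.toNat < (pvZpos result).length := by omega
    have hcast : ((c.toNat : Nat) : Int) = c := by omega
    obtain ⟨p, e', hpop, hinner, hz⟩ := pvPlace result c.toNat (i + 1) (by omega) hk
    rw [hcast] at hinner
    rw [← hinner] at hz
    simp [pvStepB, hc, hpop, ← hinner, hz]
  · have hA : pvInnerA c (i + 1) result = result := by
      by_cases h0 : 0 ≤ c
      · exact pvInnerA_big result c (i + 1) h0 (by omega)
      · exact pvInnerA_neg result c (i + 1) (by omega)
    simp [pvStepB, hc, hA]

theorem pvFold_eq (hs : List Int) : ∀ (s : Int), 0 ≤ s → ∀ (result : List Int),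
    ((PySem.List.enumerate hs s).foldl pvStepB (result, pvZpos result)).1
      = (PySem.List.enumerate hs s).foldl (fun r p => pvInnerA p.2 (p.1 + 1) r) result := by
  induction hs with
  | nil => intro s _ result; simp [PySem.List.enumerate_nil]
  | cons c hs ih =>
    intro s hs0 result
    rw [PySem.List.enumerate_cons, List.foldl_cons, List.foldl_cons,
      pvStep_eq result s c hs0]
    exact ih (s + 1) (by omega) _

theorem pvZpos_replicate (n : Nat) : pvZpos (List.replicate n 0) = List.range n := by
  induction n with
  | zero => rfl
  | succ n ih => rw [List.replicate_succ, List.range_succ_eq_map]; simp [pvZpos, ih]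

theorem pvA_enum (hs : List Int) :
    arrange_line hs
      = (PySem.List.enumerate hs 0).foldl (fun r p => pvInnerA p.2 (p.1 + 1) r)
          (List.replicate hs.length 0) := by
  rw [arrange_line, PySem.List.enumerate_eq_map_pyRange (d := 0), List.foldl_map]
  simp [PySem.List.len]

-- ===== VERDICT (by name: the statement is the Claim_ definition above) =====
theorem arrange_line_spec : Claim_equal_arrange_line := by
  intro heights _
  show arrange_line heights = arrange_line_alt heights
  rw [pvA_enum]
  show _ = ((PySem.List.enumerate heights 0).foldl pvStepB
      (List.replicate heights.length 0, List.range heights.length)).1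
  rw [← pvZpos_replicate heights.length,
    pvFold_eq heights 0 (by omega) (List.replicate heights.length 0)]
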